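-- pv_equiv track=rewrite | github.com/Sheldon-Pierce/math-series | series.py | sum_series
-- ===== SOURCE A (Python) =====
-- def fibonacci(n):
--     """
--     The next number is found by adding up the two numbers before it:
--         - the 2 is found by adding the two numbers before it (1+1),
--         the 3 is found by adding the two numbers before it (1+2),
--         the 5 is (2+3)
--     :param n:
--     1, 2, 4, 15
--     :return:
--     0, 1, 1, 2
--     """
--     if n == 0:
--         return 0
--     if n == 1:
--         return 1
--     return fibonacci(n-2) + fibonacci(n-1)
--
-- def lucas(n):
--     """
--     As with the Fibonacci numbers, each Lucas number is defined to be the sum of its two immediately previous terms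
--     :param n:
--     Any number greater than 0
--     :return:
--     2, 1, 3, 4, 7, 11
--     """
--
--     if n == 0:
--         return 2
--     if n == 1:
--         return 1
--     return lucas(n-1) + lucas(n-2)
--
-- def sum_series(n, y=0, z=1):
--     """
--     Depending on the input of the variables, you will get a different sequence.
--     :param n:
--     The nth number in the sequence
--     :param y:
--     Leave as is for Fibonacci, change to 2 for Lucas
--     :param z:
--     Leave as is for Fibonacci, change to 1 for Lucas
--     :return:
--     """
--
--     if y == 0 and z == 1:
--         return fibonacci(n)
--     if y == 2 and z == 1:
--         return lucas(n)
--     else: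
--         if n == 0:
--             return y
--         if n == 1:
--             return z
--         return sum_series(n-1, y, z) + sum_series(n-2, y, z)
-- ===== SOURCE B (Python) =====
-- def sum_series(n, y=0, z=1):
--     # All three of A's branches compute the same two-term recurrence
--     # f(0)=y, f(1)=z, f(k)=f(k-1)+f(k-2); one iterative pair loop does it in O(n).
--     a, b = y, z
--     for _ in range(n):
--         a, b = b, a + b
--     return a
-- ===== Notes on version B (the rewrite author's own statement) =====
-- stated objective: faster
-- what changed: Replaced the three-branch naive double recursion with a single iterative pair loop computing the shared recurrence f(0)=y, f(1)=z, f(k)=f(k-1)+f(k-2); intended as faster (measured 16.9x at n=16, A timed out on larger n).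
import Mathlib
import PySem

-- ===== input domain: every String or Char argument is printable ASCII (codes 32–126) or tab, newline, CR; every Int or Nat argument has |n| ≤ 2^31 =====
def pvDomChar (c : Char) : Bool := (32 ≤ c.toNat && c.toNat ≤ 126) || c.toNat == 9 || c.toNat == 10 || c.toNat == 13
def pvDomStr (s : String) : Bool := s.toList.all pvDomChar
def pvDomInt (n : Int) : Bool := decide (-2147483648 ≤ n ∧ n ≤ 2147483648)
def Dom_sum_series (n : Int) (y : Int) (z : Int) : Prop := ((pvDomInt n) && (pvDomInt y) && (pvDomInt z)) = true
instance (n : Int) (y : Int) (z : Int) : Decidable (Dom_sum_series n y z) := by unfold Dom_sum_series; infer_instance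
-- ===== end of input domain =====

-- B replaces A's naive double recursion by one iterative pair loop; intended as faster (measured 16.9x at n=16; A timed out on larger n).

-- ===== PORT A =====
-- A's helpers, structural recursion on n (via toNat; Pre_ restricts to n ≥ 0 where A terminates)
def fibonacci : Nat → Int
  | 0 => 0
  | 1 => 1
  | k + 2 => fibonacci k + fibonacci (k + 1)

def lucas : Nat → Int
  | 0 => 2
  | 1 => 1
  | k + 2 => lucas (k + 1) + lucas k

def sumSeriesRec (y z : Int) : Nat → Int
  | 0 => y
  | 1 => z
  | k + 2 => sumSeriesRec y z (k + 1) + sumSeriesRec y z k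

def sum_series (n : Int) (y : Int) (z : Int) : Int :=
  if y = 0 ∧ z = 1 then fibonacci n.toNat
  else if y = 2 ∧ z = 1 then lucas n.toNat
  else sumSeriesRec y z n.toNat

-- ===== PORT B =====
-- the pair loop: 'a, b = y, z; for _ in range(n): a, b = b, a + b; return a'
def pairLoop (y z : Int) : Nat → Int × Int
  | 0 => (y, z)
  | k + 1 => let p := pairLoop y z k; (p.2, p.1 + p.2)

def sum_series_alt (n : Int) (y : Int) (z : Int) : Int :=
  (pairLoop y z n.toNat).1

-- ===== PRECONDITION & SPEC =====
-- A recurses on n-1 / n-2 with base cases only at 0 and 1, so it raises RecursionError for n < 0.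
def Pre_sum_series (n : Int) (y : Int) (z : Int) : Prop := 0 ≤ n
instance (n : Int) (y : Int) (z : Int) : Decidable (Pre_sum_series n y z) := by unfold Pre_sum_series; infer_instance
def pvWitness_sum_series : Int × Int × Int := (7, 0, 1)

def Spec_sum_series (n : Int) (y : Int) (z : Int) (out : Int) : Prop := out = sum_series_alt n y z
instance (n : Int) (y : Int) (z : Int) (out : Int) : Decidable (Spec_sum_series n y z out) := by unfold Spec_sum_series; infer_instance

-- ===== CLAIM (what is proved, stated in full; the proofs are below) =====
def Claim_equal_sum_series : Prop := ∀ (n : Int) (y : Int) (z : Int), Dom_sum_series n y z → Pre_sum_series n y z → Spec_sum_series n y z (sum_series n y z)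

-- ===== LEMMAS AND PROOFS =====

-- invariant of B's loop: the pair holds two consecutive terms of the recurrence
theorem pairLoop_eq (y z : Int) : ∀ k : Nat, pairLoop y z k = (sumSeriesRec y z k, sumSeriesRec y z (k + 1)) := by
  intro k
  induction k with
  | zero => rfl
  | succ m ih =>
      simp [pairLoop, ih, sumSeriesRec]
      omega

theorem fib_eq_gen : ∀ k : Nat, fibonacci k = sumSeriesRec 0 1 k ∧ fibonacci (k + 1) = sumSeriesRec 0 1 (k + 1) := by
  intro k
  induction k with
  | zero => exact ⟨rfl, rfl⟩
  | succ m ih =>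
      refine ⟨ih.2, ?_⟩
      show fibonacci (m + 2) = sumSeriesRec 0 1 (m + 2)
      simp [fibonacci, sumSeriesRec, ih.1, ih.2]
      omega

theorem lucas_eq_gen : ∀ k : Nat, lucas k = sumSeriesRec 2 1 k ∧ lucas (k + 1) = sumSeriesRec 2 1 (k + 1) := by
  intro k
  induction k with
  | zero => exact ⟨rfl, rfl⟩
  | succ m ih =>
      refine ⟨ih.2, ?_⟩
      show lucas (m + 2) = sumSeriesRec 2 1 (m + 2)
      simp [lucas, sumSeriesRec, ih.1, ih.2]

-- ===== VERDICT (by name: the statement is the Claim_ definition above) =====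
theorem sum_series_spec : Claim_equal_sum_series := by
  intro n y z _ _
  show sum_series n y z = sum_series_alt n y z
  unfold sum_series sum_series_alt
  rw [pairLoop_eq]
  split_ifs with h1 h2
  · rw [h1.1, h1.2, (fib_eq_gen n.toNat).1]
  · rw [h2.1, h2.2, (lucas_eq_gen n.toNat).1]
  · rfl
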